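-- pv_equiv track=rewrite | github.com/zeze98/Algorithm | 프로그래머스/lv0/120869. 외계어 사전/외계어 사전.py | solution
-- ===== SOURCE A (Python) =====
-- def solution(spell, dic):
--     spell = {x : 0 for x in spell}
--     answer = 2
--     for i in dic:
--         if len(i) == len(spell):
--             for j in i:
--                 if j in spell:
--                     spell[j] += 1
--                 else:
--                     break
--             if len(set(spell.values())) == 1 and sum(set(spell.values())) == 1:
--                 answer = 1
--             spell = {x : 0 for x in spell}
--
--     return answer
-- ===== SOURCE B (Python) =====
-- def solution(spell, dic):
--     target = set(spell)
--     answer = 2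
--     for word in dic:
--         if len(word) == len(target) and set(word) == target:
--             answer = 1
--     return answer
-- ===== Notes on version B (the rewrite author's own statement) =====
-- stated objective: simpler
-- what changed: B drops A's inner per-character counting loop, its dict-of-counts and the set-of-values all-ones test, and instead checks each dic word with a single length guard plus set-equality against set(spell) computed once.
-- outside the precondition, e.g. on solution([], ['']): A returns 2, B returns 1
import Mathlib
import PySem

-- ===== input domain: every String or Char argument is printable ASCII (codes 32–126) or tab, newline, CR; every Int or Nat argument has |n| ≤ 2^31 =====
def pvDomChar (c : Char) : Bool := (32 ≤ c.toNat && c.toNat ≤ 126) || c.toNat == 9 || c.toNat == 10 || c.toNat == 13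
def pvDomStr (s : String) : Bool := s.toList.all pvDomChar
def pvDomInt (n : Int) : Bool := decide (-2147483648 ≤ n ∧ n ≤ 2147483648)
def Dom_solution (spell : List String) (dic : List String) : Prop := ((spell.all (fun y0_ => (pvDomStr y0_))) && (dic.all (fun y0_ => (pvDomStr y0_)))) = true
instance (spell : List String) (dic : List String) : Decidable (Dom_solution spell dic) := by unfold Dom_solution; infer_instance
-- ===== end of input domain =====

-- B replaces A's per-word character-counting dict loop by a single set-equality test per word ('simpler').

-- ===== PORT A =====
-- iterating a Python string yields one-character strings
def pvChr (c : Char) : String := String.ofList [c]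

-- spell = {x : 0 for x in spell}
def pvZeroDict (spell : List String) : PySem.Dict String Int :=
  spell.foldl (fun d x => d.insert x 0) PySem.Dict.empty

-- the inner 'for j in i: if j in spell: spell[j] += 1 else: break' loop
def pvCount : List Char → PySem.Dict String Int → PySem.Dict String Int
  | [], d => d
  | c :: rest, d =>
    if d.contains (pvChr c) then pvCount rest (d.modify (pvChr c) 0 (· + 1)) else d

def solution (spell : List String) (dic : List String) : Int :=
  let spell0 := pvZeroDict spell
  dic.foldl (fun answer i =>
    if PySem.Str.len i = (spell0.size : Int) then
      let d := pvCount i.toList spell0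
      let vs : PySem.Set Int := PySem.Set.ofList d.values
      if PySem.Set.len vs = 1 ∧ vs.sum = 1 then 1 else answer
    else answer) 2

-- ===== PORT B =====
def solution_alt (spell : List String) (dic : List String) : Int :=
  let target : PySem.Set String := PySem.Set.ofList spell
  dic.foldl (fun answer word =>
    if PySem.Str.len word = PySem.Set.len target ∧
       PySem.Set.equal (PySem.Set.ofList (word.toList.map pvChr)) target then 1 else answer) 2

-- ===== PRECONDITION & SPEC =====
-- Pre_ excludes only the degenerate inputs with an empty spell together with an empty word in dic: there A's
-- all-counts-equal-one test on an empty dict is vacuously false (answer 2) while B's set equality vacuously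
-- holds (answer 1); neither behaviour is specified for that corner.
def Pre_solution (spell : List String) (dic : List String) : Prop := spell ≠ [] ∨ "" ∉ dic
instance (spell : List String) (dic : List String) : Decidable (Pre_solution spell dic) := by unfold Pre_solution; infer_instance
def pvWitness_solution : List String × List String := (["a"], ["a"])

def Spec_solution (spell : List String) (dic : List String) (out : Int) : Prop := out = solution_alt spell dic
instance (spell : List String) (dic : List String) (out : Int) : Decidable (Spec_solution spell dic out) := by unfold Spec_solution; infer_instance

-- ===== CLAIM (what is proved, stated in full; the proofs are below) =====
def Claim_equal_solution : Prop := ∀ (spell : List String) (dic : List String), Dom_solution spell dic → Pre_solution spell dic → Spec_solution spell dic (solution spell dic)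

-- ===== LEMMAS AND PROOFS =====

-- the zero dict: its keys are the distinct spell letters, every value is 0
theorem pvZeroDict_keys (spell : List String) : (pvZeroDict spell).keys = PySem.Set.ofList spell := by
  unfold pvZeroDict
  rw [PySem.Dict.keys_foldl_insert (f := fun _ _ => 0)]
  simp [PySem.Dict.keys_empty, PySem.Set.update_nil_left]

theorem foldl_insert_zero_getD (l : List String) (d : PySem.Dict String Int)
    (h : ∀ k, d.getD k 0 = 0) (k : String) :
    (l.foldl (fun d x => d.insert x 0) d).getD k 0 = 0 := by
  induction l generalizing d with
  | nil => exact h k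
  | cons x t ih =>
      simp only [List.foldl_cons]
      exact ih _ (fun k' => by
        by_cases hx : k' = x
        · subst hx; simp [PySem.Dict.getD_insert_self]
        · rw [PySem.Dict.getD_insert_of_ne _ _ _ hx]; exact h k')

theorem pvZeroDict_getD (spell : List String) (k : String) : (pvZeroDict spell).getD k 0 = 0 :=
  foldl_insert_zero_getD spell _ (fun _ => by simp [PySem.Dict.getD_of_not_contains]) k

theorem pvZeroDict_contains (spell : List String) (s : String) :
    (pvZeroDict spell).contains s = decide (s ∈ PySem.Set.ofList spell) := by
  rw [PySem.Dict.contains_eq_decide_mem_keys, pvZeroDict_keys]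

-- pvCount never changes the key set
theorem pvCount_keys (cs : List Char) (d : PySem.Dict String Int) : (pvCount cs d).keys = d.keys := by
  induction cs generalizing d with
  | nil => rfl
  | cons c rest ih =>
      rw [pvCount]
      by_cases h : d.contains (pvChr c) = true
      · rw [if_pos h, ih, PySem.Dict.keys_modify, PySem.Dict.keys_insert_of_contains _ _ h]
      · rw [if_neg h]

-- pvCount counts each key's occurrences in the longest prefix of in-dict characters
theorem pvCount_getD (S : List String) (cs : List Char) (d : PySem.Dict String Int)
    (hc : ∀ s, d.contains s = decide (s ∈ S)) (k : String) :
    (pvCount cs d).getD k 0 =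
      d.getD k 0 + (((cs.map pvChr).takeWhile (fun s => decide (s ∈ S))).count k : Int) := by
  induction cs generalizing d with
  | nil => simp [pvCount]
  | cons c rest ih =>
      rw [pvCount, hc (pvChr c)]
      by_cases h : pvChr c ∈ S
      · rw [if_pos (by simp [h])]
        rw [ih _ (fun s => by
          rw [PySem.Dict.contains_modify, hc s]
          by_cases hs : s = pvChr c
          · subst hs; simp [h]
          · simp [hs])]
        rw [PySem.Dict.getD_modify]
        simp only [List.map_cons, List.takeWhile_cons, decide_eq_true_eq, h, if_pos trivial]
        rw [List.count_cons]
        by_cases hk : k = pvChr c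
        · subst hk; simp; omega
        · simp [hk, Ne.symm hk]
      · rw [if_neg (by simp [h])]
        simp [h]

-- set(vals) has exactly the single element 1 iff vals is a nonempty all-ones list
theorem set_ones_iff (vals : List Int) :
    (PySem.Set.len (PySem.Set.ofList vals) = 1 ∧ (PySem.Set.ofList vals).sum = 1) ↔
      (vals ≠ [] ∧ ∀ v ∈ vals, v = 1) := by
  constructor
  · rintro ⟨h1, h2⟩
    have hlen : (PySem.Set.ofList vals).length = 1 := by
      simp [PySem.Set.len] at h1; omega
    obtain ⟨w, hw⟩ := List.length_eq_one_iff.mp hlen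
    have hw1 : w = 1 := by rw [hw] at h2; simpa using h2
    refine ⟨?_, ?_⟩
    · rintro rfl; simp [PySem.Set.ofList, PySem.Set.empty] at hw
    · intro v hv
      have : v ∈ PySem.Set.ofList vals := (PySem.Set.mem_ofList vals v).mpr hv
      rw [hw, hw1] at this; simpa using this
  · rintro ⟨hne, hall⟩
    obtain ⟨v0, hv0⟩ := List.exists_mem_of_ne_nil vals hne
    have hv01 : v0 = 1 := hall v0 hv0
    have h1mem : (1 : Int) ∈ PySem.Set.ofList vals :=
      (PySem.Set.mem_ofList vals 1).mpr (hv01 ▸ hv0)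
    have hset : PySem.Set.ofList vals = [1] := by
      have hnd := PySem.Set.nodup_ofList vals
      rcases hs : PySem.Set.ofList vals with _ | ⟨a, t⟩
      · rw [hs] at h1mem; simp at h1mem
      · rw [hs] at hnd
        have ha : a = 1 := hall a ((PySem.Set.mem_ofList vals a).mp (by rw [hs]; simp))
        have ht : t = [] := by
          apply List.eq_nil_iff_forall_not_mem.mpr
          intro x hx
          have hx1 : x = 1 := hall x ((PySem.Set.mem_ofList vals x).mp (by rw [hs]; simp [hx]))
          subst hx1 ha
          exact (List.nodup_cons.mp hnd).1 hx
        rw [ha, ht]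
    rw [hset]; exact ⟨by simp [PySem.Set.len], by simp⟩

-- a Nat list of entries ≥ 1 whose sum is its length is all ones
theorem all_one_of_sum_eq_length (l : List Nat) (h1 : ∀ v ∈ l, 1 ≤ v) (h2 : l.sum = l.length) :
    ∀ v ∈ l, v = 1 := by
  induction l with
  | nil => simp
  | cons x t ih =>
      have hx : 1 ≤ x := h1 x (by simp)
      have ht : t.length ≤ t.sum := List.length_le_sum_of_one_le t (fun i hi => h1 i (by simp [hi]))
      simp only [List.sum_cons, List.length_cons] at h2
      intro v hv
      rcases List.mem_cons.mp hv with rfl | hv'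
      · omega
      · exact ih (fun i hi => h1 i (by simp [hi])) (by omega) v hv'

theorem sum_ite_one (x : String) (S : List String) (hnd : S.Nodup) (hx : x ∈ S) :
    (S.map (fun k => if x = k then 1 else 0)).sum = 1 := by
  induction S with
  | nil => simp at hx
  | cons a r ih =>
      rcases List.nodup_cons.mp hnd with ⟨har, hr⟩
      by_cases hxa : x = a
      · subst hxa
        simp only [List.map_cons, List.sum_cons]
        have : (r.map (fun k => if x = k then 1 else 0)).sum = 0 :=
          List.sum_eq_zero (by
            intro i hi
            obtain ⟨k, hk, rfl⟩ := List.mem_map.mp hi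
            have : x ≠ k := fun h => har (h ▸ hk)
            simp [this])
        simp [this]
      · have hxr : x ∈ r := by rcases List.mem_cons.mp hx with h | h; exact absurd h hxa; exact h
        simp only [List.map_cons, List.sum_cons, if_neg hxa, ih hr hxr]

-- summing the counts over a nodup cover of l's elements gives l's length
theorem sum_counts (S l : List String) (hnd : S.Nodup) (h : ∀ x ∈ l, x ∈ S) :
    (S.map (fun k => l.count k)).sum = l.length := by
  induction l with
  | nil => simp
  | cons x t ih =>
      have hx : x ∈ S := h x (by simp)
      have hmap : S.map (fun k => (x :: t).count k)
           = S.map (fun k => t.count k + if x = k then 1 else 0) := by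
        apply List.map_congr_left
        intro k _
        rw [List.count_cons]
        by_cases hk : x = k
        · subst hk; simp
        · simp [hk]
      rw [hmap, List.sum_map_add, ih (fun i hi => h i (by simp [hi])), sum_ite_one x S hnd hx]
      simp

-- the crux: A's per-word counting condition equals B's set-equality condition
theorem cond_iff (S : List String) (hnd : S.Nodup) (ss : List String)
    (hlen : ss.length = S.length) :
    (∀ k ∈ S, (ss.takeWhile (fun s => decide (s ∈ S))).count k = 1) ↔ (∀ x, x ∈ ss ↔ x ∈ S) := by
  constructor
  · intro h
    have hpS : ∀ x ∈ ss.takeWhile (fun s => decide (s ∈ S)), x ∈ S := by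
      intro x hx
      simpa using List.mem_takeWhile_imp hx
    have hsum := sum_counts S _ hnd hpS
    have hconst : (S.map (fun k => (ss.takeWhile (fun s => decide (s ∈ S))).count k)).sum = S.length := by
      rw [List.map_congr_left (fun k hk => h k hk)]
      simp
    have hplen : (ss.takeWhile (fun s => decide (s ∈ S))).length = ss.length := by omega
    have hp : ss.takeWhile (fun s => decide (s ∈ S)) = ss :=
      (List.takeWhile_prefix _).eq_of_length hplen
    intro x
    constructor
    · intro hx
      rw [← hp] at hx
      simpa using List.mem_takeWhile_imp hx
    · intro hx
      have := h x hx
      rw [hp] at this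
      exact List.count_pos_iff.mp (by omega)
  · intro h
    have hp : ss.takeWhile (fun s => decide (s ∈ S)) = ss :=
      List.takeWhile_eq_self_iff.mpr (fun x hx => by simpa using (h x).mp hx)
    rw [hp]
    have hsum : (S.map (fun k => ss.count k)).sum = S.length := by
      rw [sum_counts S ss hnd (fun x hx => (h x).mp hx)]; omega
    have hlen2 : (S.map (fun k => ss.count k)).length = S.length := by simp
    have hones := all_one_of_sum_eq_length (S.map (fun k => ss.count k))
      (by
        intro v hv
        obtain ⟨k, hk, rfl⟩ := List.mem_map.mp hv
        have : k ∈ ss := (h k).mpr hk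
        have := List.count_pos_iff.mpr this
        omega)
      (by rw [hsum, hlen2])
    intro k hk
    exact hones _ (List.mem_map.mpr ⟨k, hk, rfl⟩)

-- size of the zero dict is the number of distinct spell letters
theorem pvZeroDict_size (spell : List String) :
    (pvZeroDict spell).size = (PySem.Set.ofList spell).length := by
  have h := pvZeroDict_keys spell
  have : (pvZeroDict spell).keys.length = (pvZeroDict spell).size := by
    simp [PySem.Dict.keys, PySem.Dict.size]
  rw [← this, h]

theorem solution_eq_alt (spell dic : List String) (hpre : spell ≠ [] ∨ "" ∉ dic) :
    solution spell dic = solution_alt spell dic := by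
  unfold solution solution_alt
  apply PySem.List.foldl_congr_mem
  intro a i hi
  simp only []
  set S := PySem.Set.ofList spell with hS
  rcases eq_or_ne spell [] with hsp | hsp
  · -- empty spell : both guards are false since i ≠ ""
    have hie : i ≠ "" := by
      rcases hpre with h | h
      · exact absurd hsp h
      · exact fun he => h (he ▸ hi)
    have hlen : PySem.Str.len i ≠ 0 := by
      rw [PySem.Str.len_eq]
      intro h
      exact hie (String.toList_eq_nil_iff.mp (by exact_mod_cast List.length_eq_zero_iff.mp (by exact_mod_cast h)))
    have hS0 : S = [] := by simp [hS, hsp, PySem.Set.ofList]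
    rw [if_neg (by rw [pvZeroDict_size, ← hS, hS0]; simpa using hlen),
        if_neg (by
          rw [hS0]
          simp only [PySem.Set.len, List.length_nil, Nat.cast_zero]
          rintro ⟨h1, _⟩
          exact hlen h1)]
  · -- nonempty spell
    have hnd : S.Nodup := PySem.Set.nodup_ofList spell
    have hSne : S ≠ [] := by
      obtain ⟨v, hv⟩ := List.exists_mem_of_ne_nil spell hsp
      intro h
      have := (PySem.Set.mem_ofList spell v).mpr hv
      rw [← hS, h] at this; simp at this
    have hsize : ((pvZeroDict spell).size : Int) = (S.length : Int) := by
      rw [pvZeroDict_size, hS]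
    have hlenset : PySem.Set.len S = (S.length : Int) := by simp [PySem.Set.len]
    by_cases hl : PySem.Str.len i = (S.length : Int)
    · rw [if_pos (by rw [hsize]; exact hl)]
      have hcl : i.toList.length = S.length := by
        rw [PySem.Str.len_eq] at hl; exact_mod_cast hl
      have hssl : (i.toList.map pvChr).length = S.length := by simpa using hcl
      have hkeys : (pvCount i.toList (pvZeroDict spell)).keys = S := by
        rw [pvCount_keys, pvZeroDict_keys]
      have hvals : (pvCount i.toList (pvZeroDict spell)).values
          = S.map (fun k => (((i.toList.map pvChr).takeWhile (fun s => decide (s ∈ S))).count k : Int)) := by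
        rw [PySem.Dict.values_eq_map_keys _ (hkeys ▸ hnd) 0, hkeys]
        apply List.map_congr_left
        intro k _
        rw [pvCount_getD S i.toList (pvZeroDict spell) (pvZeroDict_contains spell), pvZeroDict_getD]
        ring
      rw [hvals]
      have hcond := set_ones_iff (S.map (fun k => (((i.toList.map pvChr).takeWhile (fun s => decide (s ∈ S))).count k : Int)))
      by_cases hA : ∀ k ∈ S, ((i.toList.map pvChr).takeWhile (fun s => decide (s ∈ S))).count k = 1
      · rw [if_pos (hcond.mpr ⟨by simpa using hSne, by
            intro v hv
            obtain ⟨k, hk, rfl⟩ := List.mem_map.mp hv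
            exact_mod_cast hA k hk⟩)]
        rw [if_pos ⟨by rw [hlenset]; exact hl, by
            rw [PySem.Set.equal_iff]
            intro x
            rw [PySem.Set.mem_ofList]
            exact (cond_iff S hnd _ hssl).mp hA x⟩]
      · rw [if_neg (fun hc => hA (by
            intro k hk
            have := (hcond.mp hc).2 _ (List.mem_map.mpr ⟨k, hk, rfl⟩)
            exact_mod_cast this))]
        rw [if_neg (by
            rintro ⟨h1, h2⟩
            apply hA
            rw [cond_iff S hnd _ hssl]
            intro x
            rw [PySem.Set.equal_iff] at h2
            have := h2 x
            rwa [PySem.Set.mem_ofList] at this)]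
    · rw [if_neg (by rw [hsize]; exact hl), if_neg (by rintro ⟨h1, _⟩; rw [hlenset] at h1; exact hl h1)]

-- ===== VERDICT (by name: the statement is the Claim_ definition above) =====
theorem solution_spec : Claim_equal_solution := by
  intro spell dic _ hpre
  exact solution_eq_alt spell dic hpre
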